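-- pv_equiv track=rewrite | github.com/xinh3ng/rnd | eng/leetcode/1131_max_expression.py | maxAbsValExprOne
-- ===== SOURCE A (Python) =====
-- from typing import List
--
-- def maxAbsValExprOne(arr1: List[int], arr2: List[int]) -> int:
--     """
--     Go through 2 "for" loops, O(n^2). May not be accepted by leetcode
--     """
--     length = len(arr1)
--     max_val = 0
--     for x in range(length):
--         for y in range(length):
--             if y <= x:
--                 continue
--
--             val = abs(arr1[y] - arr1[x]) + abs(arr2[y] - arr2[x]) + abs(y - x)
--             max_val = max(val, max_val)
--     return max_val
-- ===== SOURCE B (Python) =====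
-- from typing import List
--
-- def maxAbsValExprOne(arr1: List[int], arr2: List[int]) -> int:
--     """
--     O(n) sign trick: |a1[y]-a1[x]|+|a2[y]-a2[x]|+|y-x| is the max over the
--     four sign choices s1,s2 in {1,-1} of (s1*a1+s2*a2+i) spreads.
--     """
--     best = 0
--     for s1 in (1, -1):
--         for s2 in (1, -1):
--             hi = None
--             lo = None
--             for i, (a, b) in enumerate(zip(arr1, arr2)):
--                 v = s1 * a + s2 * b + i
--                 if hi is None or v > hi:
--                     hi = v
--                 if lo is None or v < lo:
--                     lo = v
--             if hi is not None:
--                 best = max(best, hi - lo)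
--     return best
-- ===== Notes on version B (the rewrite author's own statement) =====
-- stated objective: faster
-- what changed: Replaced A's O(n^2) scan over all index pairs by the single-pass Manhattan sign trick: for each of the four sign choices (s1,s2) in {1,-1}^2 track the running max and min of s1*arr1[i]+s2*arr2[i]+i and take the best spread.
import Mathlib
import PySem

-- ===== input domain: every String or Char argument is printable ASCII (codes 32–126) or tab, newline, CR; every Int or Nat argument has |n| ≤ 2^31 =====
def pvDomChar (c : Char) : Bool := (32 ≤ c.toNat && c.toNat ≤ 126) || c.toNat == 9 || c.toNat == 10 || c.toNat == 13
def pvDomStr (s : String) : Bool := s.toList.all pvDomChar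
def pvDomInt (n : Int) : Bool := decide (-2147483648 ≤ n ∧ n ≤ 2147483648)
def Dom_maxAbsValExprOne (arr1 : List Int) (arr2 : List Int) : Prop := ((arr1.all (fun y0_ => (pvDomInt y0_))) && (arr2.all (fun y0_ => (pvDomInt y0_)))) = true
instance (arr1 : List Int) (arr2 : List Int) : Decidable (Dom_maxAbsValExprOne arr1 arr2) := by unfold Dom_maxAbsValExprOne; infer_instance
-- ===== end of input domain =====

-- B replaces A's O(n^2) pairwise scan by the O(n) Manhattan sign trick (max-min of s1*arr1[i]+s2*arr2[i]+i over the four sign choices).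


-- ===== PORT A =====
def maxAbsValExprOne (arr1 : List Int) (arr2 : List Int) : Int :=
  let length : Int := arr1.length
  (PySem.List.pyRange 0 length 1).foldl (fun maxVal x =>
    (PySem.List.pyRange 0 length 1).foldl (fun maxVal y =>
      if y ≤ x then maxVal
      else
        let val := |PySem.List.pyGetD arr1 y 0 - PySem.List.pyGetD arr1 x 0| +
                   |PySem.List.pyGetD arr2 y 0 - PySem.List.pyGetD arr2 x 0| + |y - x|
        max val maxVal) maxVal) 0

-- ===== PORT B =====
-- inner loop of Source B: running (hi, lo) of s1*a + s2*b + i over enumerate(zip(arr1, arr2))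
def altHiLo (arr1 : List Int) (arr2 : List Int) (s1 s2 : Int) : Option Int × Option Int :=
  (PySem.List.enumerate (arr1.zip arr2) 0).foldl
    (fun (st : Option Int × Option Int) p =>
      let v := s1 * p.2.1 + s2 * p.2.2 + p.1
      let hi := match st.1 with
        | none => some v
        | some h => if v > h then some v else some h
      let lo := match st.2 with
        | none => some v
        | some l => if v < l then some v else some l
      (hi, lo)) (none, none)

def maxAbsValExprOne_alt (arr1 : List Int) (arr2 : List Int) : Int :=
  [(1 : Int), -1].foldl (fun best s1 =>
    [(1 : Int), -1].foldl (fun best s2 =>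
      match altHiLo arr1 arr2 s1 s2 with
      | (some h, some l) => max best (h - l)
      | _ => best) best) 0

-- ===== PRECONDITION & SPEC =====
-- Pre_ excludes exactly the inputs where A raises IndexError: len(arr1) ≥ 2 and arr2 shorter than arr1.
def Pre_maxAbsValExprOne (arr1 : List Int) (arr2 : List Int) : Prop :=
  arr1.length ≤ arr2.length ∨ arr1.length ≤ 1
instance (arr1 : List Int) (arr2 : List Int) : Decidable (Pre_maxAbsValExprOne arr1 arr2) := by
  unfold Pre_maxAbsValExprOne; infer_instance
def pvWitness_maxAbsValExprOne : List Int × List Int := ([1, -4, 2], [3, 0, 5])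

def Spec_maxAbsValExprOne (arr1 : List Int) (arr2 : List Int) (out : Int) : Prop := out = maxAbsValExprOne_alt arr1 arr2
instance (arr1 : List Int) (arr2 : List Int) (out : Int) : Decidable (Spec_maxAbsValExprOne arr1 arr2 out) := by unfold Spec_maxAbsValExprOne; infer_instance

-- ===== CLAIM (what is proved, stated in full; the proofs are below) =====
def Claim_equal_maxAbsValExprOne : Prop := ∀ (arr1 : List Int) (arr2 : List Int), Dom_maxAbsValExprOne arr1 arr2 → Pre_maxAbsValExprOne arr1 arr2 → Spec_maxAbsValExprOne arr1 arr2 (maxAbsValExprOne arr1 arr2)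
-- ===== LEMMAS AND PROOFS =====

-- generic bounds for left folds that only ever grow the accumulator
lemma pvFoldl_ge_init {α : Type} (F : Int → α → Int) (hF : ∀ a x, a ≤ F a x) :
    ∀ (l : List α) (init : Int), init ≤ l.foldl F init := by
  intro l
  induction l with
  | nil => intro init; simp
  | cons x t ih =>
    intro init
    simpa using le_trans (hF init x) (ih (F init x))

lemma pvFoldl_ge_mem {α : Type} (F : Int → α → Int) (hF : ∀ a x, a ≤ F a x) (g : Int) :
    ∀ (l : List α) (init : Int) (x : α), x ∈ l → (∀ a, g ≤ F a x) → g ≤ l.foldl F init := by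
  intro l
  induction l with
  | nil => intro _ x hx; exact absurd hx (List.not_mem_nil)
  | cons y t ih =>
    intro init x hx hg
    rcases List.mem_cons.mp hx with rfl | hx'
    · simpa using le_trans (hg init) (pvFoldl_ge_init F hF t (F init x))
    · simpa using ih (F init y) x hx' hg

lemma pvFoldl_le {α : Type} (F : Int → α → Int) (B : Int) :
    ∀ (l : List α), (∀ a x, x ∈ l → a ≤ B → F a x ≤ B) → ∀ init, init ≤ B → l.foldl F init ≤ B := by
  intro l
  induction l with
  | nil => intro _ init h0; simpa using h0
  | cons x t ih =>
    intro h init h0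
    simpa using ih (fun a y hy => h a y (List.mem_cons_of_mem _ hy)) (F init x)
      (h init x List.mem_cons_self h0)

-- attainment / bounds for running max / min of a projection
lemma pvFoldl_max_attained {α : Type} (f : α → Int) :
    ∀ (l : List α) (init : Int),
      l.foldl (fun a y => max a (f y)) init = init ∨
      ∃ x ∈ l, l.foldl (fun a y => max a (f y)) init = f x := by
  intro l
  induction l with
  | nil => intro init; left; rfl
  | cons y t ih =>
    intro init
    rcases ih (max init (f y)) with h | ⟨x, hx, h⟩
    · rcases max_cases init (f y) with ⟨he, _⟩ | ⟨he, _⟩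
      · left; simpa [he] using h
      · right; exact ⟨y, List.mem_cons_self, by simpa [he] using h⟩
    · right; exact ⟨x, List.mem_cons_of_mem _ hx, by simpa using h⟩

lemma pvFoldl_min_attained {α : Type} (f : α → Int) :
    ∀ (l : List α) (init : Int),
      l.foldl (fun a y => min a (f y)) init = init ∨
      ∃ x ∈ l, l.foldl (fun a y => min a (f y)) init = f x := by
  intro l
  induction l with
  | nil => intro init; left; rfl
  | cons y t ih =>
    intro init
    rcases ih (min init (f y)) with h | ⟨x, hx, h⟩
    · rcases min_cases init (f y) with ⟨he, _⟩ | ⟨he, _⟩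
      · left; simpa [he] using h
      · right; exact ⟨y, List.mem_cons_self, by simpa [he] using h⟩
    · right; exact ⟨x, List.mem_cons_of_mem _ hx, by simpa using h⟩

lemma pvFoldl_min_bounds {α : Type} (f : α → Int) :
    ∀ (l : List α) (init : Int),
      l.foldl (fun a y => min a (f y)) init ≤ init ∧
      ∀ x ∈ l, l.foldl (fun a y => min a (f y)) init ≤ f x := by
  intro l
  induction l with
  | nil => intro init; exact ⟨le_refl _, by simp⟩
  | cons y t ih =>
    intro init
    obtain ⟨h1, h2⟩ := ih (min init (f y))
    constructor
    · simpa using le_trans h1 (min_le_left _ _)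
    · intro x hx
      rcases List.mem_cons.mp hx with rfl | hx'
      · simpa using le_trans h1 (min_le_right _ _)
      · simpa using h2 x hx'

-- the abs/sign arithmetic at the heart of the equivalence
lemma pvKey1 (s1 s2 x y a1x a1y a2x a2y : Int)
    (hs1 : s1 = 1 ∨ s1 = -1) (hs2 : s2 = 1 ∨ s2 = -1) :
    (s1 * a1y + s2 * a2y + y) - (s1 * a1x + s2 * a2x + x) ≤
      |a1y - a1x| + |a2y - a2x| + |y - x| := by
  have h1 := le_abs_self (a1y - a1x)
  have h1' := neg_abs_le (a1y - a1x)
  have h2 := le_abs_self (a2y - a2x)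
  have h2' := neg_abs_le (a2y - a2x)
  have h3 := le_abs_self (y - x)
  rcases hs1 with rfl | rfl <;> rcases hs2 with rfl | rfl <;> linarith

lemma pvKey2 (x y a1x a1y a2x a2y : Int) (hxy : x < y) :
    ∃ s1 s2 : Int, (s1 = 1 ∨ s1 = -1) ∧ (s2 = 1 ∨ s2 = -1) ∧
      |a1y - a1x| + |a2y - a2x| + |y - x| =
        (s1 * a1y + s2 * a2y + y) - (s1 * a1x + s2 * a2x + x) := by
  refine ⟨if a1x ≤ a1y then 1 else -1, if a2x ≤ a2y then 1 else -1, ?_, ?_, ?_⟩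
  · split_ifs <;> simp
  · split_ifs <;> simp
  · have hy : |y - x| = y - x := abs_of_nonneg (by omega)
    split_ifs with h1 h2 h2
    · rw [abs_of_nonneg (by omega : (0:Int) ≤ a1y - a1x),
        abs_of_nonneg (by omega : (0:Int) ≤ a2y - a2x), hy]; ring
    · rw [abs_of_nonneg (by omega : (0:Int) ≤ a1y - a1x),
        abs_of_neg (by omega : a2y - a2x < 0), hy]; ring
    · rw [abs_of_neg (by omega : a1y - a1x < 0),
        abs_of_nonneg (by omega : (0:Int) ≤ a2y - a2x), hy]; ring
    · rw [abs_of_neg (by omega : a1y - a1x < 0),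
        abs_of_neg (by omega : a2y - a2x < 0), hy]; ring

-- the pairwise score A maximises
def pvV (arr1 arr2 : List Int) (x y : Int) : Int :=
  |PySem.List.pyGetD arr1 y 0 - PySem.List.pyGetD arr1 x 0| +
  |PySem.List.pyGetD arr2 y 0 - PySem.List.pyGetD arr2 x 0| + |y - x|

-- ----- characterisation of port A -----

lemma pvA_nonneg (arr1 arr2 : List Int) : 0 ≤ maxAbsValExprOne arr1 arr2 := by
  unfold maxAbsValExprOne
  apply pvFoldl_ge_init
  intro a x
  apply pvFoldl_ge_init
  intro a' y
  by_cases h : y ≤ x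
  · rw [if_pos h]
  · rw [if_neg h]; exact le_max_right _ _

lemma pvA_ge (arr1 arr2 : List Int) (x y : Int)
    (h0 : 0 ≤ x) (hxy : x < y) (hy : y < (arr1.length : Int)) :
    pvV arr1 arr2 x y ≤ maxAbsValExprOne arr1 arr2 := by
  unfold maxAbsValExprOne
  apply pvFoldl_ge_mem _ ?_ _ _ _ x
    (PySem.List.mem_pyRange_one.mpr ⟨h0, lt_trans hxy hy⟩)
  · intro a
    apply pvFoldl_ge_mem _ ?_ _ _ _ y
      (PySem.List.mem_pyRange_one.mpr ⟨by omega, hy⟩)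
    · intro a'
      rw [if_neg (by omega : ¬ y ≤ x)]
      exact le_max_left _ _
    · intro b z
      by_cases h : z ≤ x
      · rw [if_pos h]
      · rw [if_neg h]; exact le_max_right _ _
  · intro a z
    apply pvFoldl_ge_init
    intro a' w
    by_cases h : w ≤ z
    · rw [if_pos h]
    · rw [if_neg h]; exact le_max_right _ _

lemma pvA_le (arr1 arr2 : List Int) (B : Int) (h0 : 0 ≤ B)
    (h : ∀ x y : Int, 0 ≤ x → x < y → y < (arr1.length : Int) → pvV arr1 arr2 x y ≤ B) :
    maxAbsValExprOne arr1 arr2 ≤ B := by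
  unfold maxAbsValExprOne
  apply pvFoldl_le _ B _ ?_ _ h0
  intro a x hxmem ha
  apply pvFoldl_le _ B _ ?_ _ ha
  intro a' y hymem ha'
  by_cases hyx : y ≤ x
  · rw [if_pos hyx]; exact ha'
  · rw [if_neg hyx]
    have hx := PySem.List.mem_pyRange_one.mp hxmem
    have hy := PySem.List.mem_pyRange_one.mp hymem
    exact max_le (h x y hx.1 (by omega) hy.2) ha'

-- ----- characterisation of port B -----

lemma pvIfMax (v h : Int) : (if v > h then some v else some h) = some (max h v) := by
  split_ifs with hc <;> simp <;> omega

lemma pvIfMin (v l : Int) : (if v < l then some v else some l) = some (min l v) := by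
  split_ifs with hc <;> simp <;> omega

lemma pvHiLo_some (s1 s2 : Int) :
    ∀ (l : List (Int × Int × Int)) (h l0 : Int),
      l.foldl (fun (st : Option Int × Option Int) (p : Int × Int × Int) =>
        let v := s1 * p.2.1 + s2 * p.2.2 + p.1
        let hi := match st.1 with
          | none => some v
          | some h => if v > h then some v else some h
        let lo := match st.2 with
          | none => some v
          | some l => if v < l then some v else some l
        (hi, lo)) (some h, some l0)
      = (some (l.foldl (fun a p => max a (s1 * p.2.1 + s2 * p.2.2 + p.1)) h),
         some (l.foldl (fun a p => min a (s1 * p.2.1 + s2 * p.2.2 + p.1)) l0)) := by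
  intro l
  induction l with
  | nil => intro h l0; rfl
  | cons p t ih =>
    intro h l0
    simp only [List.foldl_cons]
    rw [pvIfMax, pvIfMin]
    exact ih _ _

-- empty-zip value of altHiLo
lemma pvAltHiLo_nil (arr1 arr2 : List Int) (s1 s2 : Int) (hz : arr1.zip arr2 = []) :
    altHiLo arr1 arr2 s1 s2 = (none, none) := by
  unfold altHiLo
  rw [hz]
  rfl

lemma pvAltHiLo_eq (arr1 arr2 : List Int) (s1 s2 : Int) (z : Int × Int) (zs : List (Int × Int))
    (hz : arr1.zip arr2 = z :: zs) :
    altHiLo arr1 arr2 s1 s2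
      = (some ((PySem.List.enumerate zs 1).foldl
            (fun a p => max a (s1 * p.2.1 + s2 * p.2.2 + p.1)) (s1 * z.1 + s2 * z.2)),
         some ((PySem.List.enumerate zs 1).foldl
            (fun a p => min a (s1 * p.2.1 + s2 * p.2.2 + p.1)) (s1 * z.1 + s2 * z.2))) := by
  unfold altHiLo
  rw [hz, PySem.List.enumerate_cons]
  simp only [List.foldl_cons, zero_add, add_zero]
  exact pvHiLo_some s1 s2 (PySem.List.enumerate zs 1) _ _

-- value, bounds and attainment of altHiLo over the enumerated zip (nonempty case)
lemma pvHiLo_char (arr1 arr2 : List Int) (s1 s2 : Int) (z : Int × Int) (zs : List (Int × Int))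
    (hz : arr1.zip arr2 = z :: zs) :
    ∃ h l0 : Int, altHiLo arr1 arr2 s1 s2 = (some h, some l0) ∧
      (∃ p ∈ PySem.List.enumerate (arr1.zip arr2) 0, h = s1 * p.2.1 + s2 * p.2.2 + p.1) ∧
      (∃ q ∈ PySem.List.enumerate (arr1.zip arr2) 0, l0 = s1 * q.2.1 + s2 * q.2.2 + q.1) ∧
      (∀ p ∈ PySem.List.enumerate (arr1.zip arr2) 0,
        s1 * p.2.1 + s2 * p.2.2 + p.1 ≤ h ∧ l0 ≤ s1 * p.2.1 + s2 * p.2.2 + p.1) := by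
  refine ⟨_, _, pvAltHiLo_eq arr1 arr2 s1 s2 z zs hz, ?_, ?_, ?_⟩
  · rw [hz, PySem.List.enumerate_cons]
    rcases pvFoldl_max_attained (fun p => s1 * p.2.1 + s2 * p.2.2 + p.1)
        (PySem.List.enumerate zs 1) (s1 * z.1 + s2 * z.2) with he | ⟨x, hx, he⟩
    · exact ⟨((0 : Int), z), List.mem_cons_self, by rw [he]; ring⟩
    · exact ⟨x, List.mem_cons_of_mem _ hx, he⟩
  · rw [hz, PySem.List.enumerate_cons]
    rcases pvFoldl_min_attained (fun p => s1 * p.2.1 + s2 * p.2.2 + p.1)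
        (PySem.List.enumerate zs 1) (s1 * z.1 + s2 * z.2) with he | ⟨x, hx, he⟩
    · exact ⟨((0 : Int), z), List.mem_cons_self, by rw [he]; ring⟩
    · exact ⟨x, List.mem_cons_of_mem _ hx, he⟩
  · rw [hz, PySem.List.enumerate_cons]
    intro p hp
    rcases List.mem_cons.mp hp with rfl | hp'
    · constructor
      · have := (PySem.List.le_foldl_max_int (PySem.List.enumerate zs 1)
          (fun p => s1 * p.2.1 + s2 * p.2.2 + p.1) (s1 * z.1 + s2 * z.2)).1
        calc s1 * ((0 : Int), z).2.1 + s2 * ((0 : Int), z).2.2 + ((0 : Int), z).1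
            = s1 * z.1 + s2 * z.2 := by ring
          _ ≤ _ := this
      · have := (pvFoldl_min_bounds (fun p => s1 * p.2.1 + s2 * p.2.2 + p.1)
          (PySem.List.enumerate zs 1) (s1 * z.1 + s2 * z.2)).1
        calc _ ≤ s1 * z.1 + s2 * z.2 := this
          _ = s1 * ((0 : Int), z).2.1 + s2 * ((0 : Int), z).2.2 + ((0 : Int), z).1 := by ring
    · exact ⟨(PySem.List.le_foldl_max_int _ _ _).2 p hp',
        (pvFoldl_min_bounds _ _ _).2 p hp'⟩

-- index form of membership in the enumerated zip, when arr2 is long enough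
lemma pvMem_E (arr1 arr2 : List Int) (hlen : arr1.length ≤ arr2.length)
    (p : Int × Int × Int) (hp : p ∈ PySem.List.enumerate (arr1.zip arr2) 0) :
    0 ≤ p.1 ∧ p.1 < (arr1.length : Int) ∧
      p.2.1 = PySem.List.pyGetD arr1 p.1 0 ∧ p.2.2 = PySem.List.pyGetD arr2 p.1 0 := by
  obtain ⟨k, hk, rfl⟩ := (PySem.List.mem_enumerate_iff _ _ _).mp hp
  have hk' : k < min arr1.length arr2.length := by
    rw [← List.length_zip]; exact hk
  have hk1 : k < arr1.length := by omega
  have hk2 : k < arr2.length := by omega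
  simp only [List.getElem_zip, zero_add]
  refine ⟨by positivity, by exact_mod_cast hk1, ?_, ?_⟩
  · rw [PySem.List.pyGetD_eq_getElem _ _ (by positivity) (by exact_mod_cast hk1)]
    simp
  · rw [PySem.List.pyGetD_eq_getElem _ _ (by positivity) (by exact_mod_cast hk2)]
    simp

lemma pvMem_E' (arr1 arr2 : List Int) (hlen : arr1.length ≤ arr2.length)
    (k : Nat) (hk : k < arr1.length) :
    ((k : Int), (PySem.List.pyGetD arr1 (k : Int) 0, PySem.List.pyGetD arr2 (k : Int) 0))
      ∈ PySem.List.enumerate (arr1.zip arr2) 0 := by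
  apply (PySem.List.mem_enumerate_iff _ _ _).mpr
  refine ⟨k, by rw [List.length_zip]; omega, ?_⟩
  simp only [List.getElem_zip, zero_add]
  rw [PySem.List.pyGetD_eq_getElem _ _ (by positivity) (by exact_mod_cast hk),
    PySem.List.pyGetD_eq_getElem _ _ (by positivity) (by exact_mod_cast (by omega : k < arr2.length))]
  simp

-- ----- bounds for the top-level fold of B over the four sign pairs -----

lemma pvAlt_nonneg (arr1 arr2 : List Int) : 0 ≤ maxAbsValExprOne_alt arr1 arr2 := by
  unfold maxAbsValExprOne_alt
  apply pvFoldl_ge_init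
  intro a s1
  apply pvFoldl_ge_init
  intro a' s2
  rcases h : altHiLo arr1 arr2 s1 s2 with ⟨hi, lo⟩
  cases hi <;> cases lo <;> first | exact le_refl _ | exact le_max_left _ _

lemma pvAlt_ge (arr1 arr2 : List Int) (s1 s2 h l0 : Int)
    (hs1 : s1 = 1 ∨ s1 = -1) (hs2 : s2 = 1 ∨ s2 = -1)
    (hHiLo : altHiLo arr1 arr2 s1 s2 = (some h, some l0)) :
    h - l0 ≤ maxAbsValExprOne_alt arr1 arr2 := by
  have hmono : ∀ (a s1' : Int), a ≤ [(1 : Int), -1].foldl (fun best s2' =>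
      match altHiLo arr1 arr2 s1' s2' with
      | (some h', some l') => max best (h' - l')
      | _ => best) a := by
    intro a s1'
    apply pvFoldl_ge_init
    intro a' s2'
    rcases altHiLo arr1 arr2 s1' s2' with ⟨_ | _, _ | _⟩ <;>
      first | exact le_refl _ | exact le_max_left _ _
  unfold maxAbsValExprOne_alt
  apply pvFoldl_ge_mem _ (fun a x => hmono a x) _ _ _ s1
    (by rcases hs1 with rfl | rfl <;> simp)
  intro a
  apply pvFoldl_ge_mem _ ?_ _ _ _ s2 (by rcases hs2 with rfl | rfl <;> simp)
  · intro a'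
    rw [hHiLo]
    exact le_max_right _ _
  · intro a' s2'
    rcases altHiLo arr1 arr2 s1 s2' with ⟨_ | _, _ | _⟩ <;>
      first | exact le_refl _ | exact le_max_left _ _

lemma pvAlt_le (arr1 arr2 : List Int) (B : Int) (h0 : 0 ≤ B)
    (h : ∀ s1 s2 h' l0 : Int, (s1 = 1 ∨ s1 = -1) → (s2 = 1 ∨ s2 = -1) →
      altHiLo arr1 arr2 s1 s2 = (some h', some l0) → h' - l0 ≤ B) :
    maxAbsValExprOne_alt arr1 arr2 ≤ B := by
  unfold maxAbsValExprOne_alt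
  apply pvFoldl_le _ B _ ?_ _ h0
  intro a s1 hs1 ha
  apply pvFoldl_le _ B _ ?_ _ ha
  intro a' s2 hs2 ha'
  rcases hh : altHiLo arr1 arr2 s1 s2 with ⟨_ | h', _ | l0⟩
  · exact ha'
  · exact ha'
  · exact ha'
  · exact max_le ha' (h s1 s2 h' l0 (by simpa using hs1) (by simpa using hs2) hh)

-- ----- the equivalence on inputs where both arrays are long enough -----

lemma pvMain_long (arr1 arr2 : List Int) (hlen : arr1.length ≤ arr2.length) :
    maxAbsValExprOne arr1 arr2 = maxAbsValExprOne_alt arr1 arr2 := by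
  apply le_antisymm
  · -- A ≤ B : every pair score is matched by some sign pair's spread
    apply pvA_le _ _ _ (pvAlt_nonneg arr1 arr2)
    intro x y hx hxy hy
    obtain ⟨s1, s2, hs1, hs2, heq⟩ :=
      pvKey2 x y (PySem.List.pyGetD arr1 x 0) (PySem.List.pyGetD arr1 y 0)
        (PySem.List.pyGetD arr2 x 0) (PySem.List.pyGetD arr2 y 0) hxy
    have hne : ∃ z zs, arr1.zip arr2 = z :: zs := by
      cases hz : arr1.zip arr2 with
      | nil =>
        exfalso
        have : (arr1.zip arr2).length = 0 := by rw [hz]; rfl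
        rw [List.length_zip] at this
        omega
      | cons z zs => exact ⟨z, zs, rfl⟩
    obtain ⟨z, zs, hz⟩ := hne
    obtain ⟨h, l0, hHiLo, _, _, hbd⟩ := pvHiLo_char arr1 arr2 s1 s2 z zs hz
    have hxmem := pvMem_E' arr1 arr2 hlen x.toNat (by omega)
    have hymem := pvMem_E' arr1 arr2 hlen y.toNat (by omega)
    rw [(by omega : ((x.toNat : Int)) = x)] at hxmem
    rw [(by omega : ((y.toNat : Int)) = y)] at hymem
    have hbx := hbd _ hxmem
    have hby := hbd _ hymem
    simp only at hbx hby
    calc pvV arr1 arr2 x y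
        = (s1 * PySem.List.pyGetD arr1 y 0 + s2 * PySem.List.pyGetD arr2 y 0 + y)
          - (s1 * PySem.List.pyGetD arr1 x 0 + s2 * PySem.List.pyGetD arr2 x 0 + x) := heq
      _ ≤ h - l0 := by linarith [hby.1, hbx.2]
      _ ≤ _ := pvAlt_ge arr1 arr2 s1 s2 h l0 hs1 hs2 hHiLo
  · -- B ≤ A : every sign pair's spread is a pair score (or zero)
    apply pvAlt_le _ _ _ (pvA_nonneg arr1 arr2)
    intro s1 s2 h l0 hs1 hs2 hHiLo
    cases hz : arr1.zip arr2 with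
    | nil =>
      rw [pvAltHiLo_nil arr1 arr2 s1 s2 hz] at hHiLo
      exact absurd hHiLo (by simp)
    | cons z zs =>
      obtain ⟨h', l0', hHiLo', hattH, hattL, _⟩ := pvHiLo_char arr1 arr2 s1 s2 z zs hz
      rw [hHiLo'] at hHiLo
      obtain ⟨rfl, rfl⟩ : h' = h ∧ l0' = l0 := by
        constructor <;> [exact Option.some.inj (congrArg Prod.fst hHiLo);
          exact Option.some.inj (congrArg Prod.snd hHiLo)]
      obtain ⟨p, hp, hpv⟩ := hattH
      obtain ⟨q, hq, hqv⟩ := hattL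
      obtain ⟨hp0, hpn, hpa, hpb⟩ := pvMem_E arr1 arr2 hlen p hp
      obtain ⟨hq0, hqn, hqa, hqb⟩ := pvMem_E arr1 arr2 hlen q hq
      rw [hpa, hpb] at hpv
      rw [hqa, hqb] at hqv
      rcases lt_trichotomy p.1 q.1 with hlt | heq | hgt
      · -- h - l0 ≤ pvV p.1 q.1
        have hk := pvKey1 s1 s2 q.1 p.1
          (PySem.List.pyGetD arr1 q.1 0) (PySem.List.pyGetD arr1 p.1 0)
          (PySem.List.pyGetD arr2 q.1 0) (PySem.List.pyGetD arr2 p.1 0) hs1 hs2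
        have hV : pvV arr1 arr2 p.1 q.1 ≤ maxAbsValExprOne arr1 arr2 :=
          pvA_ge arr1 arr2 p.1 q.1 hp0 hlt hqn
        unfold pvV at hV
        rw [abs_sub_comm (PySem.List.pyGetD arr1 q.1 0) (PySem.List.pyGetD arr1 p.1 0),
          abs_sub_comm (PySem.List.pyGetD arr2 q.1 0) (PySem.List.pyGetD arr2 p.1 0),
          abs_sub_comm q.1 p.1] at hV
        rw [hpv, hqv]
        linarith [hk, hV]
      · have hzero : h' = l0' := by rw [hpv, hqv, heq]
        linarith [hzero, pvA_nonneg arr1 arr2]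
      · have hk := pvKey1 s1 s2 q.1 p.1
          (PySem.List.pyGetD arr1 q.1 0) (PySem.List.pyGetD arr1 p.1 0)
          (PySem.List.pyGetD arr2 q.1 0) (PySem.List.pyGetD arr2 p.1 0) hs1 hs2
        have hV : pvV arr1 arr2 q.1 p.1 ≤ maxAbsValExprOne arr1 arr2 :=
          pvA_ge arr1 arr2 q.1 p.1 hq0 hgt hpn
        unfold pvV at hV
        rw [hpv, hqv]
        linarith [hk, hV]


lemma pvMain (arr1 arr2 : List Int) (hpre : Pre_maxAbsValExprOne arr1 arr2) :
    maxAbsValExprOne arr1 arr2 = maxAbsValExprOne_alt arr1 arr2 := by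
  by_cases hlen : arr1.length ≤ arr2.length
  · exact pvMain_long arr1 arr2 hlen
  · have hn : arr1.length ≤ 1 := by
      rcases hpre with h | h
      · exact absurd h hlen
      · exact h
    obtain ⟨a, rfl⟩ : ∃ a, arr1 = [a] := List.length_eq_one_iff.mp (by omega)
    obtain rfl : arr2 = [] := List.length_eq_zero_iff.mp (by omega)
    have hA : maxAbsValExprOne [a] [] = 0 := by
      have h1 : PySem.List.pyRange 0 (((1 : Nat) : Int)) 1 = [0] := by decide
      unfold maxAbsValExprOne
      simp only [List.length_cons, List.length_nil, Nat.zero_add, h1, List.foldl_cons,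
        List.foldl_nil]
      norm_num
    have hB : maxAbsValExprOne_alt [a] [] = 0 := rfl
    rw [hA, hB]

-- ===== VERDICT (by name: the statement is the Claim_ definition above) =====
theorem maxAbsValExprOne_spec : Claim_equal_maxAbsValExprOne := by
  intro arr1 arr2 _ hpre
  exact pvMain arr1 arr2 hpre
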